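-- pv_equiv track=rewrite | github.com/dessn7-bit/brewmaster | _step58_b1_merge_misc_hops.py | has_kw
-- ===== SOURCE A (Python) =====
-- def has_kw(misc_list, kws):
--     if not misc_list:
--         return 0
--     for m in misc_list:
--         if not isinstance(m, dict):
--             continue
--         n1 = (m.get('name') or '').lower()
--         n2 = (m.get('name_original') or '').lower()
--         for kw in kws:
--             if kw in n1 or kw in n2:
--                 return 1
--     return 0
-- ===== SOURCE B (Python) =====
-- def has_kw(misc_list, kws):
--     names = []
--     for m in misc_list:
--         if isinstance(m, dict):
--             names.append((m.get('name') or '').lower())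
--             names.append((m.get('name_original') or '').lower())
--     return int(any(kw in s for s in names for kw in kws))
-- ===== Notes on version B (the rewrite author's own statement) =====
-- stated objective: simpler
-- what changed: Two-phase decomposition: one pass collects all lowered name/name_original strings into a flat list, then a single any() comprehension tests every keyword against that list, replacing A's interleaved nested loops with early returns and the redundant empty-list guard.
import Mathlib
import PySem

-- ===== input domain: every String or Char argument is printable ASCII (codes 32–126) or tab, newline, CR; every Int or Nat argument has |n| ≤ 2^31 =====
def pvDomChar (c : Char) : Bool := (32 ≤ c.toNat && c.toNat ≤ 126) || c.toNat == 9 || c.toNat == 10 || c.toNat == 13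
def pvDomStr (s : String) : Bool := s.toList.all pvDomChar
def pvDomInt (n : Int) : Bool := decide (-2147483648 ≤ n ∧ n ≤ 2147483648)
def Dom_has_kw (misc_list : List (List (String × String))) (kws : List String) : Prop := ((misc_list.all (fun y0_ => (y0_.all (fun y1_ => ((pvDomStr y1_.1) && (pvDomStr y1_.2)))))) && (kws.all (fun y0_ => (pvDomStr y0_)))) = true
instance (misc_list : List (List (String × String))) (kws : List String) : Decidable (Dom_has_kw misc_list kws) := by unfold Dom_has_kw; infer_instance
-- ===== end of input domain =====

-- B restructures A as two phases: collect all lowered name strings first, then one any() over them (same cost; simpler).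
-- Under the type convention every element of misc_list is a dict, so A's isinstance check is always true.

-- ===== PORT A =====
-- (m.get(k) or '') : the `or ''` returns '' when the lookup is None or the empty (falsy) string
def pyNameGet (m : List (String × String)) (k : String) : String :=
  match PySem.Dict.get? (PySem.Dict.mk m) k with
  | some s => if s ≠ "" then s else ""
  | none => ""

-- inner `for kw in kws: if kw in n1 or kw in n2: return 1`
def hasKwInner (kws : List String) (n1 n2 : String) : Bool :=
  match kws with
  | [] => false
  | kw :: rest =>
      if PySem.Str.isIn kw n1 || PySem.Str.isIn kw n2 then true else hasKwInner rest n1 n2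

-- outer `for m in misc_list` with early return 1
def hasKwLoop (ms : List (List (String × String))) (kws : List String) : Int :=
  match ms with
  | [] => 0
  | m :: rest =>
      let n1 := PySem.Str.lower (pyNameGet m "name")
      let n2 := PySem.Str.lower (pyNameGet m "name_original")
      if hasKwInner kws n1 n2 then 1 else hasKwLoop rest kws

def has_kw (misc_list : List (List (String × String))) (kws : List String) : Int :=
  if misc_list = [] then 0 else hasKwLoop misc_list kws

-- ===== PORT B =====
-- phase 1: names.append(...) for each m, via a fold accumulating the list
def hasKwNames (misc_list : List (List (String × String))) : List String :=
  misc_list.foldl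
    (fun acc m =>
      acc ++ [PySem.Str.lower (pyNameGet m "name"), PySem.Str.lower (pyNameGet m "name_original")])
    []

def has_kw_alt (misc_list : List (List (String × String))) (kws : List String) : Int :=
  let names := hasKwNames misc_list
  -- int(any(kw in s for s in names for kw in kws))
  if names.any (fun s => kws.any (fun kw => PySem.Str.isIn kw s)) then 1 else 0

-- ===== PRECONDITION & SPEC =====
def Spec_has_kw (misc_list : List (List (String × String))) (kws : List String) (out : Int) : Prop := out = has_kw_alt misc_list kws
instance (misc_list : List (List (String × String))) (kws : List String) (out : Int) : Decidable (Spec_has_kw misc_list kws out) := by unfold Spec_has_kw; infer_instance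

-- ===== CLAIM (what is proved, stated in full; the proofs are below) =====
def Claim_equal_has_kw : Prop := ∀ (misc_list : List (List (String × String))) (kws : List String), Dom_has_kw misc_list kws → Spec_has_kw misc_list kws (has_kw misc_list kws)

-- ===== LEMMAS AND PROOFS =====

-- A's inner early-return loop is the disjunction of two any's
theorem hasKwInner_eq (kws : List String) (n1 n2 : String) :
    hasKwInner kws n1 n2
      = (kws.any (fun kw => PySem.Str.isIn kw n1) || kws.any (fun kw => PySem.Str.isIn kw n2)) := by
  induction kws with
  | nil => rfl
  | cons kw rest ih =>
      simp only [hasKwInner, List.any_cons]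
      cases h1 : PySem.Str.isIn kw n1 <;> cases h2 : PySem.Str.isIn kw n2 <;> simp [ih]

-- B's fold builds the flat list of lowered names
theorem hasKwNames_eq (ms : List (List (String × String))) (acc : List String) :
    ms.foldl
      (fun acc m =>
        acc ++ [PySem.Str.lower (pyNameGet m "name"), PySem.Str.lower (pyNameGet m "name_original")])
      acc
    = acc ++ ms.flatMap
        (fun m => [PySem.Str.lower (pyNameGet m "name"), PySem.Str.lower (pyNameGet m "name_original")]) := by
  induction ms generalizing acc with
  | nil => simp
  | cons m rest ih => simp [ih]

theorem hasKwLoop_eq (ms : List (List (String × String))) (kws : List String) :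
    hasKwLoop ms kws = has_kw_alt ms kws := by
  induction ms with
  | nil => rfl
  | cons m rest ih =>
      simp only [has_kw_alt, hasKwNames, hasKwNames_eq, List.nil_append] at ih ⊢
      simp only [hasKwLoop, hasKwInner_eq, List.flatMap_cons, List.cons_append, List.any_cons]
      cases ha : kws.any (fun kw => PySem.Str.isIn kw (PySem.Str.lower (pyNameGet m "name"))) <;>
        cases hb : kws.any (fun kw => PySem.Str.isIn kw (PySem.Str.lower (pyNameGet m "name_original"))) <;>
          simp [ih]

-- ===== VERDICT (by name: the statement is the Claim_ definition above) =====
theorem has_kw_spec : Claim_equal_has_kw := by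
  intro misc_list kws _
  unfold Spec_has_kw has_kw
  by_cases h : misc_list = []
  · subst h; rfl
  · simp [h, hasKwLoop_eq]
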